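-- pv_equiv track=rewrite | github.com/jonDomino/nba_scanner | data_build/top_of_book.py | get_yes_bid_top_and_liquidity
-- ===== SOURCE A (Python) =====
-- from typing import Dict, Any, Optional, Tuple
--
-- def get_yes_bid_top_and_liquidity(orderbook: Dict[str, Any]) -> Tuple[Optional[int], Optional[int], Dict[int, int]]:
--     """
--     Extract top YES bid price and its liquidity from orderbook.
--
--     Internal function: Reads orderbook["yes"] bids (maker prices for YES exposure).
--
--     Args:
--         orderbook: Kalshi orderbook dict with "yes" bid array (format: [[price_cents, qty], ...])
--
--     Returns:
--         (yes_bid_top_c, yes_bid_top_liq, yes_bids_by_price_dict)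
--         - yes_bid_top_c: Maximum YES bid price in cents, or None
--         - yes_bid_top_liq: Total liquidity (quantity) at top YES bid price, or None
--         - yes_bids_by_price_dict: Dict mapping price -> total quantity for all YES bid levels
--     """
--     yes_bids = orderbook.get("yes") or []
--
--     if not yes_bids or not isinstance(yes_bids, list):
--         return (None, None, {})
--
--     # Find max YES bid price and accumulate quantities by price
--     yes_bid_top_c = None
--     yes_bids_by_price = {}
--
--     for bid in yes_bids:
--         if isinstance(bid, list) and len(bid) >= 2:
--             price_cents = int(bid[0])
--             qty = int(bid[1])
--
--             # Track max price
--             if yes_bid_top_c is None or price_cents > yes_bid_top_c: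
--                 yes_bid_top_c = price_cents
--
--             # Accumulate quantities by price (in case multiple entries at same price)
--             if price_cents in yes_bids_by_price:
--                 yes_bids_by_price[price_cents] += qty
--             else:
--                 yes_bids_by_price[price_cents] = qty
--
--     # Get liquidity at top price
--     yes_bid_top_liq = yes_bids_by_price.get(yes_bid_top_c, 0) if yes_bid_top_c is not None else None
--
--     return (yes_bid_top_c, yes_bid_top_liq, yes_bids_by_price)
-- ===== SOURCE B (Python) =====
-- def get_yes_bid_top_and_liquidity(orderbook):
--     yes_bids = orderbook.get("yes") or []
--     if not yes_bids or not isinstance(yes_bids, list):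
--         return (None, None, {})
--     # Stage 1: validate/convert once into a flat pair list.
--     pairs = [(int(b[0]), int(b[1])) for b in yes_bids
--              if isinstance(b, list) and len(b) >= 2]
--     if not pairs:
--         return (None, None, {})
--     # Stage 2: group-by comprehension over the distinct prices (first-occurrence order).
--     prices = [p for p, _ in pairs]
--     by_price = {p: sum(q for pp, q in pairs if pp == p)
--                 for p in dict.fromkeys(prices)}
--     # Stage 3: top of book read off the price list.
--     top = max(prices)
--     return (top, by_price[top], by_price)
-- ===== Notes on version B (the rewrite author's own statement) =====
-- stated objective: alternative
-- what changed: Instead of a single pass that threads a running maximum and a mutable accumulating dict, B works in stages: it first materialises the list of valid (price, qty) pairs, then builds the per-price dict by a group-by comprehension (distinct prices via dict.fromkeys, each total computed by a sum over the pair list), and reads the top price with max() over the price list; it trades A's O(n) accumulation for an O(n*k) grouping.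
import Mathlib
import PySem

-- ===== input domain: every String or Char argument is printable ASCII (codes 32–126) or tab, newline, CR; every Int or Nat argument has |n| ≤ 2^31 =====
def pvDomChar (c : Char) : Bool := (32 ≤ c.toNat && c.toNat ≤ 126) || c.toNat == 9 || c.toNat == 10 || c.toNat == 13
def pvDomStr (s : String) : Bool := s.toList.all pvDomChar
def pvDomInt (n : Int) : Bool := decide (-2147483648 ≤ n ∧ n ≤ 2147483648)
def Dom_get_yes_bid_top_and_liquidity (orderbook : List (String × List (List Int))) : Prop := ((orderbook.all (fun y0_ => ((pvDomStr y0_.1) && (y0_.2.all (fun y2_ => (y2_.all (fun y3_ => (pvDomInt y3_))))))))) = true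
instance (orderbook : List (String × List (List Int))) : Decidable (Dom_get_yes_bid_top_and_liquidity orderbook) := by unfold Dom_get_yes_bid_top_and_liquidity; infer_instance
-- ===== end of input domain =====

-- B re-implements A in stages: it first extracts the valid (price, qty) pairs, then builds the
-- per-price dict by a group-by over the distinct prices (each total a sum over the pair list),
-- and reads the top price with max() over the price list; equivalence proved on all inputs.


-- ===== PORT A =====
-- loop body of A: update running max and accumulate quantity (contains-branch, as in A)
def pvStepA (st : Option Int × PySem.Dict Int Int) (bid : List Int) :
    Option Int × PySem.Dict Int Int :=
  match bid with
  | p :: q :: _ =>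
    let top' : Option Int :=
      match st.1 with
      | none => some p
      | some t => if p > t then some p else some t
    let d' := if st.2.contains p then st.2.modify p 0 (· + q) else st.2.insert p q
    (top', d')
  | _ => st

def get_yes_bid_top_and_liquidity (orderbook : List (String × List (List Int))) : Option Int × Option Int × (List (Int × Int)) :=
  let yes_bids := ((PySem.Dict.mk orderbook).get? "yes").getD []   -- orderbook.get("yes") or []
  if yes_bids = [] then (none, none, [])
  else
    let st := yes_bids.foldl pvStepA (none, PySem.Dict.empty)
    let liq : Option Int :=
      match st.1 with
      | some t => some (st.2.getD t 0)   -- yes_bids_by_price.get(top, 0)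
      | none => none
    (st.1, liq, st.2.items)

-- ===== PORT B =====
-- stage 1 of B: the list of valid (price, qty) pairs
def pvPairs (l : List (List Int)) : List (Int × Int) :=
  l.filterMap (fun b => match b with | p :: q :: _ => some (p, q) | _ => none)

def get_yes_bid_top_and_liquidity_alt (orderbook : List (String × List (List Int))) : Option Int × Option Int × (List (Int × Int)) :=
  let yes_bids := ((PySem.Dict.mk orderbook).get? "yes").getD []
  if yes_bids = [] then (none, none, [])
  else
    let pairs := pvPairs yes_bids
    if pairs = [] then (none, none, [])
    else
      let prices := pairs.map Prod.fst
      -- {p: sum(q for pp, q in pairs if pp == p) for p in dict.fromkeys(prices)}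
      let by_price := (PySem.List.dedup prices).map
        (fun p => (p, ((pairs.filter (fun x => x.1 == p)).map Prod.snd).sum))
      match PySem.List.max? prices (fun x => x) with   -- max(prices); some since prices ≠ []
      | none => (none, none, by_price)
      | some t => (some t, (by_price.find? (fun x => x.1 == t)).map Prod.snd, by_price)

-- ===== PRECONDITION & SPEC =====
def Spec_get_yes_bid_top_and_liquidity (orderbook : List (String × List (List Int))) (out : Option Int × Option Int × (List (Int × Int))) : Prop := out = get_yes_bid_top_and_liquidity_alt orderbook
instance (orderbook : List (String × List (List Int))) (out : Option Int × Option Int × (List (Int × Int))) : Decidable (Spec_get_yes_bid_top_and_liquidity orderbook out) := by unfold Spec_get_yes_bid_top_and_liquidity; infer_instance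

-- ===== CLAIM (what is proved, stated in full; the proofs are below) =====
def Claim_equal_get_yes_bid_top_and_liquidity : Prop := ∀ (orderbook : List (String × List (List Int))), Dom_get_yes_bid_top_and_liquidity orderbook → Spec_get_yes_bid_top_and_liquidity orderbook (get_yes_bid_top_and_liquidity orderbook)

-- ===== LEMMAS AND PROOFS =====

-- the pair-level accumulation step A's dict loop amounts to
def pvIns (d : PySem.Dict Int Int) (x : Int × Int) : PySem.Dict Int Int :=
  d.insert x.1 (d.getD x.1 0 + x.2)

-- A's dict branch at one bid is pvIns on the extracted pair (and skips invalid bids)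
lemma stepA_dict (st : Option Int × PySem.Dict Int Int) (bid : List Int) :
    (pvStepA st bid).2 = (pvPairs [bid]).foldl pvIns st.2 := by
  match bid with
  | [] => rfl
  | [_] => rfl
  | p :: q :: rest =>
    simp only [pvStepA, pvPairs, List.filterMap, List.foldl, pvIns]
    by_cases hc : st.2.contains p = true
    · have hd : st.2.modify p 0 (· + q) = st.2.insert p (st.2.getD p 0 + q) := rfl
      simp [hc, hd]
    · have hg : st.2.getD p 0 = 0 :=
        PySem.Dict.getD_of_not_contains st.2 0 (by simpa using hc)
      simp [hc, hg]

-- A's top branch: running max, in terms of max? over the dict's keys (as in pvIns-folded dicts)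
lemma max?_id_append_singleton (xs : List Int) (p : Int) :
    PySem.List.max? (xs ++ [p]) (fun x => x) =
      some (match PySem.List.max? xs (fun x => x) with | none => p | some t => max t p) := by
  cases xs with
  | nil => simp [PySem.List.max?]
  | cons x t =>
      rw [List.cons_append, PySem.List.max?_id_cons, PySem.List.max?_id_cons]
      simp [List.foldl_append]

lemma step_invariant (d : PySem.Dict Int Int) (bid : List Int) :
    pvStepA (PySem.List.max? d.keys (fun x => x), d) bid =
      (PySem.List.max? ((pvPairs [bid]).foldl pvIns d).keys (fun x => x),
       (pvPairs [bid]).foldl pvIns d) := by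
  match bid with
  | [] => rfl
  | [_] => rfl
  | p :: q :: rest =>
    have hd2 := stepA_dict (PySem.List.max? d.keys (fun x => x), d) (p :: q :: rest)
    refine Prod.ext ?_ (by simpa using hd2)
    simp only [pvStepA, pvPairs, List.filterMap, List.foldl, pvIns]
    by_cases hc : d.contains p = true
    · have hk := PySem.Dict.keys_insert_of_contains (d:=d) (k:=p) (v:=d.getD p 0 + q) hc
      have hpmem : p ∈ d.keys := (PySem.Dict.contains_iff_mem_keys d p).mp hc
      have hne : d.keys ≠ [] := fun h => by simp [h] at hpmem
      rcases hm : PySem.List.max? d.keys (fun x => x) with _ | t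
      · exact absurd ((PySem.List.max?_eq_none_iff d.keys (fun x => x)).mp hm) hne
      · have hle : p ≤ t := PySem.List.max?_isMax hm p hpmem
        simp [hk, hm, not_lt.mpr hle]
    · have hk := PySem.Dict.keys_insert_of_not_contains (d:=d) (k:=p) (v:=d.getD p 0 + q)
        (by simpa using hc)
      simp only [hk, max?_id_append_singleton]
      rcases hm : PySem.List.max? d.keys (fun x => x) with _ | t
      · simp
      · have : (if p > t then some p else some t) = some (max t p) := by
          split_ifs with h <;> simp [max_def] <;> omega
        simp [this]

lemma fold_invariant (l : List (List Int)) (d : PySem.Dict Int Int) :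
    l.foldl pvStepA (PySem.List.max? d.keys (fun x => x), d) =
      (PySem.List.max? ((pvPairs l).foldl pvIns d).keys (fun x => x),
       (pvPairs l).foldl pvIns d) := by
  induction l generalizing d with
  | nil => rfl
  | cons b t ih =>
      rw [List.foldl_cons, step_invariant, ih]
      have hsplit : pvPairs (b :: t) = pvPairs [b] ++ pvPairs t := by
        rcases b with _ | ⟨p, _ | ⟨q, rest⟩⟩ <;> rfl
      rw [hsplit, List.foldl_append]

-- getD of the accumulated dict is the grouped sum
lemma getD_fold_pvIns (ps : List (Int × Int)) (d : PySem.Dict Int Int) (v : Int) :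
    (ps.foldl pvIns d).getD v 0 =
      d.getD v 0 + ((ps.filter (fun x => x.1 == v)).map Prod.snd).sum := by
  induction ps generalizing d with
  | nil => simp
  | cons x t ih =>
      rw [List.foldl_cons, ih]
      by_cases h : x.1 = v
      · simp [pvIns, h]
        ring
      · simp [pvIns, PySem.Dict.getD_insert, h, Ne.symm h]

-- keys of the accumulated dict from empty are the distinct prices in first-occurrence order
lemma keys_fold_pvIns (ps : List (Int × Int)) :
    (ps.foldl pvIns PySem.Dict.empty).keys = PySem.List.dedup (ps.map Prod.fst) := by
  have h := PySem.Dict.keys_foldl_insert_key (l := ps) (key := Prod.fst)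
    (f := fun d x => d.getD x.1 0 + x.2) (d := (PySem.Dict.empty : PySem.Dict Int Int))
  simpa [pvIns, PySem.Set.update_nil_left] using h

lemma nodup_keys_fold_pvIns (ps : List (Int × Int)) :
    (ps.foldl pvIns PySem.Dict.empty).keys.Nodup :=
  PySem.Dict.nodup_keys_foldl_insert_key ps Prod.fst _ _ PySem.Dict.nodup_keys_empty

-- max? with identity key only depends on membership
lemma max?_id_congr_mem (xs ys : List Int) (h : ∀ x, x ∈ xs ↔ x ∈ ys) :
    PySem.List.max? xs (fun x => x) = PySem.List.max? ys (fun x => x) := by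
  rcases hx : PySem.List.max? xs (fun x => x) with _ | m
  · have : xs = [] := (PySem.List.max?_eq_none_iff xs (fun x => x)).mp hx
    rcases hy : PySem.List.max? ys (fun x => x) with _ | m'
    · rfl
    · have hm' : m' ∈ ys := PySem.List.max?_mem hy
      exact absurd ((h m').mpr hm') (by simp [this])
  · have hm : m ∈ ys := (h m).mp (PySem.List.max?_mem hx)
    rcases hy : PySem.List.max? ys (fun x => x) with _ | m'
    · have : ys = [] := (PySem.List.max?_eq_none_iff ys (fun x => x)).mp hy
      simp [this] at hm
    · have h1 : m ≤ m' := PySem.List.max?_isMax hy m hm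
      have h2 : m' ≤ m := PySem.List.max?_isMax hx m' ((h m').mpr (PySem.List.max?_mem hy))
      simp [le_antisymm h1 h2]

-- find? with an equality test on a list containing the target returns the target
lemma find?_beq_self (ks : List Int) (t : Int) (ht : t ∈ ks) :
    ks.find? (fun x => x == t) = some t := by
  induction ks with
  | nil => simp at ht
  | cons k tl ih =>
      by_cases h : k = t
      · simp [h]
      · rcases List.mem_cons.mp ht with h' | h'
        · exact absurd h'.symm h
        · simp [h, ih h']

-- ===== VERDICT (by name: the statement is the Claim_ definition above) =====
theorem get_yes_bid_top_and_liquidity_spec : Claim_equal_get_yes_bid_top_and_liquidity := by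
  intro orderbook _
  unfold Spec_get_yes_bid_top_and_liquidity get_yes_bid_top_and_liquidity
    get_yes_bid_top_and_liquidity_alt
  set l := ((PySem.Dict.mk orderbook).get? "yes").getD [] with hl
  by_cases h : l = []
  · simp [h]
  · simp only [h, if_false]
    rw [show ((none : Option Int), (PySem.Dict.empty : PySem.Dict Int Int)) =
        (PySem.List.max? (PySem.Dict.empty : PySem.Dict Int Int).keys (fun x => x),
         (PySem.Dict.empty : PySem.Dict Int Int)) from rfl, fold_invariant]
    set ps := pvPairs l with hps
    set dA := ps.foldl pvIns PySem.Dict.empty with hdA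
    have hkeys : dA.keys = PySem.List.dedup (ps.map Prod.fst) := keys_fold_pvIns ps
    have hnd : dA.keys.Nodup := nodup_keys_fold_pvIns ps
    have hmax : PySem.List.max? dA.keys (fun x => x) =
        PySem.List.max? (ps.map Prod.fst) (fun x => x) := by
      apply max?_id_congr_mem
      intro x
      rw [hkeys]
      simp
    have hitems : dA.items = (PySem.List.dedup (ps.map Prod.fst)).map
        (fun p => (p, ((ps.filter (fun x => x.1 == p)).map Prod.snd).sum)) := by
      rw [PySem.Dict.items_eq_map_keys dA hnd 0, hkeys]
      apply List.map_congr_left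
      intro p _
      rw [hdA, getD_fold_pvIns]
      simp
    by_cases hps0 : ps = []
    · have hdE : dA = PySem.Dict.empty := by rw [hdA, hps0]; rfl
      simp [hps0, hdE, PySem.List.max?, PySem.Dict.empty]
    · simp only [hps0, if_false]
      have hne : ps.map Prod.fst ≠ [] := by simpa using hps0
      rcases hm : PySem.List.max? (ps.map Prod.fst) (fun x => x) with _ | t
      · exact absurd ((PySem.List.max?_eq_none_iff _ _).mp hm) hne
      · have htmem : t ∈ PySem.List.dedup (ps.map Prod.fst) := by
          rw [PySem.List.mem_dedup]
          exact PySem.List.max?_mem hm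
        have hfind : (PySem.List.dedup (ps.map Prod.fst)).find? (fun x => x == t) = some t :=
          find?_beq_self _ t htmem
        have hliq : dA.getD t 0 = ((ps.filter (fun x => x.1 == t)).map Prod.snd).sum := by
          rw [hdA, getD_fold_pvIns]; simp
        simp [hmax, hm, hitems, hliq, List.find?_map, Function.comp_def]
        exact ⟨t, by simpa using hfind, rfl⟩
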